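-- pv_equiv track=rewrite | github.com/valquiriastorer/alinhamento | alinhamento.py | pontuacao
-- ===== SOURCE A (Python) =====
-- DNA = 'ATCG'
--
-- GAP = '_'
--
-- def pontuacao(s, t, ga, la, ldif, lgap):
--     ''' (str, str, int, int, int, int) -> int
--
--     RECEBE duas strings `s` e `t` de mesmo tamanho com zero ou mais gaps
--     representando fitas de DNA; e quatro inteiros `ga`, `la`, `ldif`, `lgap`.
--
--     RETORNA a pontuação do alinhamento entre `s` e `t` calculada da seguinte
--     forma:
--
--        * dois gaps alinhados contam `ga` pontos,
--        * duas letras iguais alinhadas contam `la` pontos,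
--        * duas letras diferentes alinhadas contam `-ldif` pontos (subtrai ldif pontos) e
--        * uma letra alinhada com um gap contam `-lgap` pontos (subtrai lgap pontos).
--
--     Exemplos:
--
--     In  [1]: pontuacao('T_', 'CT', 1, 5, 6, 3)
--     Out [1]: -9
--
--     In  [2]: pontuacao('T_CGTAC', 'T_CG_TC', 1, 5, 6, 3)
--     Out [2]: 12
--
--     In  [3]: pontuacao('T_CGTAC', 'A_CG_T_', 2, 3, 5, 4)
--     Out [3]: -10
--
--     In  [4]: pontuacao('T_CGTA',  'A_CGT_', -1, 5, 3, 2)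
--     Out [4]: 9
--     '''
--     # modifique o código abaixo para conter a sua solução.
--
--     n = len(s)
--     pontos = 0
--     i = 0
--     while i < n:
--         if s[i] in DNA and t[i] in DNA:
--             if s[i] == t[i]:
--                 pontos += la
--             else:
--                 pontos -= ldif
--         elif s[i] in GAP and t[i] in GAP:
--             pontos += ga
--         else:
--             pontos -= lgap
--         i += 1
--     return pontos
-- ===== SOURCE B (Python) =====
-- DNA = 'ATCG'
--
-- GAP = '_'
--
-- def pontuacao(s, t, ga, la, ldif, lgap):
--     # Tally the four mutually-exclusive categories, then combine in closed form.
--     pairs = [(s[i], t[i]) for i in range(len(s))]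
--     m = sum(1 for a, b in pairs if a == b and a in DNA)
--     d = sum(1 for a, b in pairs if a in DNA and b in DNA and a != b)
--     g = sum(1 for a, b in pairs if a == GAP and b == GAP)
--     o = len(pairs) - m - d - g
--     return la * m - ldif * d + ga * g - lgap * o
-- ===== Notes on version B (the rewrite author's own statement) =====
-- stated objective: simpler
-- what changed: Replaced the while-loop with a single running accumulator and inline branch ladder by building the list of aligned character pairs, counting the four mutually-exclusive categories (match, mismatch, double gap, rest) with comprehensions, and returning the closed-form combination la*m - ldif*d + ga*g - lgap*o.
-- outside the precondition, e.g. on pontuacao('_yT9', 'G_G', 0, 5, 9, 5): A returns -24, B raises IndexError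
import Mathlib
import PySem

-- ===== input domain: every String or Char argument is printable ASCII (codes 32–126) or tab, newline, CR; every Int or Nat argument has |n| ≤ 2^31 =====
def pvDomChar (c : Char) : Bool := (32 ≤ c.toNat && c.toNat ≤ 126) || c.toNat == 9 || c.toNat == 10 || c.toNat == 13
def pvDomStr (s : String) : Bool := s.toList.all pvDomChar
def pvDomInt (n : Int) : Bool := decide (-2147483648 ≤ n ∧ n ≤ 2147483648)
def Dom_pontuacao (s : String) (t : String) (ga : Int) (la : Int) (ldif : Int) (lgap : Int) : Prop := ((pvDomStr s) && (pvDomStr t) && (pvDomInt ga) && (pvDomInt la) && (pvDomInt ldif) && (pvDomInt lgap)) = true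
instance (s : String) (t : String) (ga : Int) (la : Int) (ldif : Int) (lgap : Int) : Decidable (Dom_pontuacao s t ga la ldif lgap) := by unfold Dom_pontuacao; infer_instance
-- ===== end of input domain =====

-- B tallies the four mutually-exclusive categories and combines them in closed form;
-- A keeps one running score in a while-loop branch ladder. Return values agree on Pre_.

-- `c in DNA` with DNA = 'ATCG'
def pvInDNA (c : Char) : Bool := "ATCG".toList.contains c

-- ===== PORT A =====
-- the while-loop of A: index i, accumulator pontos
def pontuacaoGo (sl tl : List Char) (ga la ldif lgap : Int) (n : Nat) (i : Nat) (pontos : Int) : Int :=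
  if _h : i < n then
    let a := sl.getD i ' '   -- in-range on every admitted input (i < len(s)); t[i] in range by Pre_
    let b := tl.getD i ' '
    let pontos' :=
      if pvInDNA a && pvInDNA b then
        if a == b then pontos + la else pontos - ldif
      else if a == '_' && b == '_' then pontos + ga
      else pontos - lgap
    pontuacaoGo sl tl ga la ldif lgap n (i + 1) pontos'
  else pontos
termination_by n - i

def pontuacao (s : String) (t : String) (ga : Int) (la : Int) (ldif : Int) (lgap : Int) : Int :=
  pontuacaoGo s.toList t.toList ga la ldif lgap s.toList.length 0 0

-- ===== PORT B =====
def pontuacao_alt (s : String) (t : String) (ga : Int) (la : Int) (ldif : Int) (lgap : Int) : Int :=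
  let sl := s.toList
  let tl := t.toList
  let pairs := (List.range sl.length).map (fun i => (sl.getD i ' ', tl.getD i ' '))
  let m : Int := (pairs.filter (fun p => p.1 == p.2 && pvInDNA p.1)).length
  let d : Int := (pairs.filter (fun p => pvInDNA p.1 && pvInDNA p.2 && p.1 != p.2)).length
  let g : Int := (pairs.filter (fun p => p.1 == '_' && p.2 == '_')).length
  let o : Int := (pairs.length : Int) - m - d - g
  la * m - ldif * d + ga * g - lgap * o

-- ===== PRECONDITION & SPEC =====
-- Pre_ excludes inputs with t shorter than s: there B (and usually A) raises IndexError at t[i];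
-- A happens to return when every overhanging s-position is neither a DNA letter nor '_' (its `and`
-- short-circuit skips t[i]), an accident of evaluation order B's pair-building does not reproduce.
def Pre_pontuacao (s : String) (t : String) (ga : Int) (la : Int) (ldif : Int) (lgap : Int) : Prop :=
  s.toList.length ≤ t.toList.length
instance (s : String) (t : String) (ga : Int) (la : Int) (ldif : Int) (lgap : Int) : Decidable (Pre_pontuacao s t ga la ldif lgap) := by unfold Pre_pontuacao; infer_instance

def pvWitness_pontuacao : String × String × Int × Int × Int × Int := ("T_", "CT", 1, 5, 6, 3)

def Spec_pontuacao (s : String) (t : String) (ga : Int) (la : Int) (ldif : Int) (lgap : Int) (out : Int) : Prop := out = pontuacao_alt s t ga la ldif lgap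
instance (s : String) (t : String) (ga : Int) (la : Int) (ldif : Int) (lgap : Int) (out : Int) : Decidable (Spec_pontuacao s t ga la ldif lgap out) := by unfold Spec_pontuacao; infer_instance

-- ===== CLAIM (what is proved, stated in full; the proofs are below) =====
def Claim_equal_pontuacao : Prop := ∀ (s : String) (t : String) (ga : Int) (la : Int) (ldif : Int) (lgap : Int), Dom_pontuacao s t ga la ldif lgap → Pre_pontuacao s t ga la ldif lgap → Spec_pontuacao s t ga la ldif lgap (pontuacao s t ga la ldif lgap)

-- ===== LEMMAS AND PROOFS =====

-- per-pair contribution of A's branch ladder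
def pvContrib (ga la ldif lgap : Int) (p : Char × Char) : Int :=
  if pvInDNA p.1 && pvInDNA p.2 then (if p.1 == p.2 then la else -ldif)
  else if p.1 == '_' && p.2 == '_' then ga
  else -lgap

lemma go_eq_tally (sl tl : List Char) (ga la ldif lgap : Int) (n : Nat) :
    ∀ (k i : Nat), n - i = k → ∀ (pontos : Int),
      pontuacaoGo sl tl ga la ldif lgap n i pontos =
        pontos + ((List.range' i k).map
          (fun j => pvContrib ga la ldif lgap (sl.getD j ' ', tl.getD j ' '))).sum := by
  intro k
  induction k with
  | zero =>
    intro i hk pontos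
    have : ¬ i < n := by omega
    rw [pontuacaoGo]
    simp [this]
  | succ k ih =>
    intro i hk pontos
    have hi : i < n := by omega
    rw [pontuacaoGo]
    simp only [hi, dif_pos]
    rw [ih (i + 1) (by omega)]
    rw [List.range'_succ]
    simp [pvContrib]
    split_ifs <;> ring

lemma pvInDNA_underscore : pvInDNA '_' = false := by decide

lemma pvClassify (ga la ldif lgap : Int) (a b : Char) :
    ((a == b && pvInDNA a) = true ∧ ¬((pvInDNA a && pvInDNA b && a != b) = true) ∧ ¬((a == '_' && b == '_') = true) ∧ pvContrib ga la ldif lgap (a, b) = la)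
  ∨ (¬((a == b && pvInDNA a) = true) ∧ ((pvInDNA a && pvInDNA b && a != b) = true) ∧ ¬((a == '_' && b == '_') = true) ∧ pvContrib ga la ldif lgap (a, b) = -ldif)
  ∨ (¬((a == b && pvInDNA a) = true) ∧ ¬((pvInDNA a && pvInDNA b && a != b) = true) ∧ ((a == '_' && b == '_') = true) ∧ pvContrib ga la ldif lgap (a, b) = ga)
  ∨ (¬((a == b && pvInDNA a) = true) ∧ ¬((pvInDNA a && pvInDNA b && a != b) = true) ∧ ¬((a == '_' && b == '_') = true) ∧ pvContrib ga la ldif lgap (a, b) = -lgap) := by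
  by_cases hA : pvInDNA a = true <;> by_cases hB : pvInDNA b = true <;>
    by_cases hab : a = b <;> by_cases hga : a = '_' <;> by_cases hgb : b = '_' <;>
    simp_all [pvContrib, pvInDNA_underscore]

lemma tally_eq_counts (ga la ldif lgap : Int) (l : List (Char × Char)) :
    (l.map (pvContrib ga la ldif lgap)).sum =
      la * ((l.filter (fun p => p.1 == p.2 && pvInDNA p.1)).length : Int)
      - ldif * ((l.filter (fun p => pvInDNA p.1 && pvInDNA p.2 && p.1 != p.2)).length : Int)
      + ga * ((l.filter (fun p => p.1 == '_' && p.2 == '_')).length : Int)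
      - lgap * ((l.length : Int)
          - ((l.filter (fun p => p.1 == p.2 && pvInDNA p.1)).length : Int)
          - ((l.filter (fun p => pvInDNA p.1 && pvInDNA p.2 && p.1 != p.2)).length : Int)
          - ((l.filter (fun p => p.1 == '_' && p.2 == '_')).length : Int)) := by
  induction l with
  | nil => simp
  | cons p rest ih =>
    obtain ⟨a, b⟩ := p
    rcases pvClassify ga la ldif lgap a b with ⟨h1, h2, h3, hc⟩ | ⟨h1, h2, h3, hc⟩ | ⟨h1, h2, h3, hc⟩ | ⟨h1, h2, h3, hc⟩ <;>
      · simp only [List.map_cons, List.sum_cons, hc, ih, List.filter_cons, List.length_cons, h1, h2, h3,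
          if_pos, if_neg]
        push_cast
        ring

-- ===== VERDICT (by name: the statement is the Claim_ definition above) =====
theorem pontuacao_spec : Claim_equal_pontuacao := by
  intro s t ga la ldif lgap _hdom _hpre
  unfold Spec_pontuacao pontuacao pontuacao_alt
  rw [go_eq_tally s.toList t.toList ga la ldif lgap s.toList.length s.toList.length 0 (by omega) 0]
  rw [show List.range' 0 s.toList.length = List.range s.toList.length from List.range_eq_range'.symm]
  rw [show (List.range s.toList.length).map
        (fun j => pvContrib ga la ldif lgap (s.toList.getD j ' ', t.toList.getD j ' '))
      = ((List.range s.toList.length).map (fun i => (s.toList.getD i ' ', t.toList.getD i ' '))).map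
          (pvContrib ga la ldif lgap) from by rw [List.map_map]; rfl]
  rw [tally_eq_counts]
  simp only [zero_add]
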